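-- pv_equiv track=rewrite | github.com/dsspasov/HackBulgaria | week0/2-Python-harder-problems-set/problem36.py | nth_fib_lists
-- ===== SOURCE A (Python) =====
-- def nth_fib_lists(listA, listB, n):
--     if n==1:
--         return listA
--     if n==2:
--         return listB
--     if n==3:
--         return listA+listB
--     else:
--         return nth_fib_lists(listA,listB,n-1)+nth_fib_lists(listA,listB,n-2)
-- ===== SOURCE B (Python) =====
-- def nth_fib_lists(listA, listB, n):
--     if n == 1:
--         return listA
--     if n == 2:
--         return listB
--     prev, cur = listB, listA + listB
--     for _ in range(n - 3):
--         prev, cur = cur, cur + prev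
--     return cur
-- ===== Notes on version B (the rewrite author's own statement) =====
-- stated objective: alternative
-- what changed: Replaced the double recursion (which recomputes subresults) with an iterative loop keeping only the last two lists and concatenating once per step; the output size itself is exponential in n, so total cost is still dominated by building the result (measured 1.69x at the largest size both finished, below the 1.5x-confirmed bar at sizes where both complete).
import Mathlib
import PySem

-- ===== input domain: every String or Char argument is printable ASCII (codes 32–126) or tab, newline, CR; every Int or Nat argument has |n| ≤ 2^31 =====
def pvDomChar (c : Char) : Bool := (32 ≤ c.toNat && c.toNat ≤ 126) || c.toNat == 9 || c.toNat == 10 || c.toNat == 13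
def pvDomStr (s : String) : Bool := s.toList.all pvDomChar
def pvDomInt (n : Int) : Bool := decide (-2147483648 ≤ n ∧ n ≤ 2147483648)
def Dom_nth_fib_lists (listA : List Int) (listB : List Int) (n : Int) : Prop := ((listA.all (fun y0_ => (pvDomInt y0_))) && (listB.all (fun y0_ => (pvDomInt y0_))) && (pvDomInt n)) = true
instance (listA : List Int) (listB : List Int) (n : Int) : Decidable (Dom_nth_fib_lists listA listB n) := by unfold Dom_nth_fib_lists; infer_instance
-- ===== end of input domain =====

-- B replaces A's double recursion with an iterative loop keeping the last two lists and
-- concatenating once per step (alternative algorithm; total cost is still dominated by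
-- the exponentially sized output).


-- ===== PORT A =====
-- Literal port of A's double recursion; the final 'else []' branch (n ≤ 0) is a
-- totality guard: there the Python recurses forever, which Pre_ excludes.
def nth_fib_lists (listA : List Int) (listB : List Int) (n : Int) : List Int :=
  if n = 1 then listA
  else if n = 2 then listB
  else if n = 3 then listA ++ listB
  else if 4 ≤ n then
    nth_fib_lists listA listB (n - 1) ++ nth_fib_lists listA listB (n - 2)
  else []
termination_by n.toNat
decreasing_by all_goals omega

-- ===== PORT B =====
-- the 'for _ in range(n-3)' loop of Source B carrying (prev, cur)
def nthFibLoop (k : Nat) (s : List Int × List Int) : List Int × List Int :=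
  match k with
  | 0 => s
  | k + 1 => nthFibLoop k (s.2, s.2 ++ s.1)

def nth_fib_lists_alt (listA : List Int) (listB : List Int) (n : Int) : List Int :=
  if n = 1 then listA
  else if n = 2 then listB
  else (nthFibLoop (n - 3).toNat (listB, listA ++ listB)).2

-- ===== PRECONDITION & SPEC =====
-- Pre_ excludes n ≤ 0, where the Python A recurses without a base case (RecursionError).
def Pre_nth_fib_lists (listA : List Int) (listB : List Int) (n : Int) : Prop := 1 ≤ n
instance (listA : List Int) (listB : List Int) (n : Int) : Decidable (Pre_nth_fib_lists listA listB n) := by unfold Pre_nth_fib_lists; infer_instance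
def pvWitness_nth_fib_lists : List Int × List Int × Int := ([1, 2], [3], 5)

def Spec_nth_fib_lists (listA : List Int) (listB : List Int) (n : Int) (out : List Int) : Prop := out = nth_fib_lists_alt listA listB n
instance (listA : List Int) (listB : List Int) (n : Int) (out : List Int) : Decidable (Spec_nth_fib_lists listA listB n out) := by unfold Spec_nth_fib_lists; infer_instance

-- ===== CLAIM (what is proved, stated in full; the proofs are below) =====
def Claim_equal_nth_fib_lists : Prop := ∀ (listA : List Int) (listB : List Int) (n : Int), Dom_nth_fib_lists listA listB n → Pre_nth_fib_lists listA listB n → Spec_nth_fib_lists listA listB n (nth_fib_lists listA listB n)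
-- ===== LEMMAS AND PROOFS =====

-- A satisfies the Fibonacci recurrence from 4 on.
theorem nth_fib_rec (listA listB : List Int) (n : Int) (h : 4 ≤ n) :
    nth_fib_lists listA listB n =
      nth_fib_lists listA listB (n - 1) ++ nth_fib_lists listA listB (n - 2) := by
  rw [nth_fib_lists]
  have h1 : ¬ n = 1 := by omega
  have h2 : ¬ n = 2 := by omega
  have h3 : ¬ n = 3 := by omega
  simp [h1, h2, h3, h]

-- Loop invariant: started from (A m, A (m+1)) for m ≥ 2, k steps of the loop land on
-- (A (m+k), A (m+k+1)), where A is the port of A.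
theorem nthFibLoop_inv (listA listB : List Int) (k : Nat) (m : Int) (hm : 2 ≤ m) :
    nthFibLoop k (nth_fib_lists listA listB m, nth_fib_lists listA listB (m + 1)) =
      (nth_fib_lists listA listB (m + k), nth_fib_lists listA listB (m + k + 1)) := by
  induction k generalizing m with
  | zero => simp [nthFibLoop]
  | succ k ih =>
    have hrec : nth_fib_lists listA listB (m + 1 + 1) =
        nth_fib_lists listA listB (m + 1) ++ nth_fib_lists listA listB m := by
      have h := nth_fib_rec listA listB (m + 2) (by omega)
      rw [show m + 2 - 1 = m + 1 by ring, show m + 2 - 2 = m by ring] at h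
      rw [show m + 1 + 1 = m + 2 by ring, h]
    simp only [nthFibLoop]
    rw [← hrec, ih (m + 1) (by omega)]
    have e1 : m + 1 + (k : Int) = m + ((k + 1 : Nat) : Int) := by push_cast; ring
    rw [e1]

-- ===== VERDICT (by name: the statement is the Claim_ definition above) =====
theorem nth_fib_lists_spec : Claim_equal_nth_fib_lists := by
  intro listA listB n _ hpre
  unfold Spec_nth_fib_lists nth_fib_lists_alt
  by_cases h1 : n = 1
  · simp [h1, nth_fib_lists]
  · by_cases h2 : n = 2
    · simp [h1, h2, nth_fib_lists]
    · have hn : 3 ≤ n := by unfold Pre_nth_fib_lists at hpre; omega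
      simp only [h1, h2, if_false]
      have h2' : nth_fib_lists listA listB 2 = listB := by rw [nth_fib_lists]; norm_num
      have h3' : nth_fib_lists listA listB 3 = listA ++ listB := by rw [nth_fib_lists]; norm_num
      have key := nthFibLoop_inv listA listB (n - 3).toNat 2 (by omega)
      rw [show (2 : Int) + 1 = 3 by norm_num, h2', h3'] at key
      rw [key]
      show nth_fib_lists listA listB n = nth_fib_lists listA listB (2 + ((n - 3).toNat : Int) + 1)
      congr 1
      omega
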